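-- pv_equiv track=rewrite | github.com/spandana2004/Verbal-Ability-Grading-System | main.py | provide_feedback
-- ===== SOURCE A (Python) =====
-- def provide_feedback(scores):
--     feedback = []
--     for metric, score in scores.items():
--         if score > 8:
--             feedback.append(f"Excellent {metric} skills.")
--         elif score > 6:
--             feedback.append(f"Good {metric} skills.")
--         elif score > 4:
--             feedback.append(f"Average {metric} skills.")
--         else:
--             feedback.append(f"Needs improvement in {metric}.")
--     return "\n".join(feedback)
-- ===== SOURCE B (Python) =====
-- def provide_feedback(scores):
--     # Streaming: build the result string directly (no intermediate list, no join),
--     # and pick the wording by the closed-form band index clamp((score-3)//2, 0, 3)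
--     # instead of a comparison cascade: bands <=4 / 5-6 / 7-8 / >=9 map to 0/1/2/3.
--     labels = (
--         "Needs improvement in {}.",
--         "Average {} skills.",
--         "Good {} skills.",
--         "Excellent {} skills.",
--     )
--     out = ""
--     sep = ""
--     for metric, score in scores.items():
--         band = min(max((score - 3) // 2, 0), 3)
--         out += sep + labels[band].format(metric)
--         sep = "\n"
--     return out
-- ===== Notes on version B (the rewrite author's own statement) =====
-- stated objective: alternative
-- what changed: Replaces collect-lines-then-join plus a four-way comparison cascade by streaming string accumulation with a separator and a closed-form arithmetic band index clamp((score-3)//2, 0, 3) into a label table.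
import Mathlib
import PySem

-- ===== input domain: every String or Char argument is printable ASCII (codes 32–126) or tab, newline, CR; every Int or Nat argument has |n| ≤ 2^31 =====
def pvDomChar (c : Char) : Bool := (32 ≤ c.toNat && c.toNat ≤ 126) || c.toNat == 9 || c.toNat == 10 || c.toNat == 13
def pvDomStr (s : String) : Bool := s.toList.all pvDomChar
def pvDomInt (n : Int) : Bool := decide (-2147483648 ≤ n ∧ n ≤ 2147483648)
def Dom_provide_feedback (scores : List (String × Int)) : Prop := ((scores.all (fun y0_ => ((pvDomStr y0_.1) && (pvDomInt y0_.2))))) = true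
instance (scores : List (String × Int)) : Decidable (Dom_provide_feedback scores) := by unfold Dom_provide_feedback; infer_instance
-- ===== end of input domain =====

-- B streams the result string directly (separator state, no list/join) and picks the wording by the
-- closed-form band index clamp((score-3)//2, 0, 3) instead of a comparison cascade (alternative, same cost).

-- ===== PORT A =====
-- A: collect one formatted line per metric in a list, then "\n".join
def provide_feedback (scores : List (String × Int)) : String :=
  let feedback := scores.foldl (fun fb ms =>
    if ms.2 > 8 then fb ++ ["Excellent " ++ ms.1 ++ " skills."]
    else if ms.2 > 6 then fb ++ ["Good " ++ ms.1 ++ " skills."]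
    else if ms.2 > 4 then fb ++ ["Average " ++ ms.1 ++ " skills."]
    else fb ++ ["Needs improvement in " ++ ms.1 ++ "."]) []
  PySem.Str.join "\n" feedback

-- ===== PORT B =====
-- each template "<pre>{}<suf>" is ported as the pair (pre, suf); .format(metric) is pre ++ metric ++ suf (exact for these templates)
def pvLabels : List (String × String) :=
  [("Needs improvement in ", "."), ("Average ", " skills."),
   ("Good ", " skills."), ("Excellent ", " skills.")]

-- B's loop body; the state is the pair (out, sep), sep is "" before the first item, "\n" after
def pvStepB (st : String × String) (ms : String × Int) : String × String :=
  let band := min (max (PySem.Int.floordiv (ms.2 - 3) 2) 0) 3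
  let tpl := pvLabels.getD band.toNat ("", "")
  (st.1 ++ st.2 ++ (tpl.1 ++ ms.1 ++ tpl.2), "\n")

def provide_feedback_alt (scores : List (String × Int)) : String :=
  (scores.foldl pvStepB ("", "")).1

-- ===== PRECONDITION & SPEC =====
def Spec_provide_feedback (scores : List (String × Int)) (out : String) : Prop := out = provide_feedback_alt scores
instance (scores : List (String × Int)) (out : String) : Decidable (Spec_provide_feedback scores out) := by unfold Spec_provide_feedback; infer_instance

-- ===== CLAIM (what is proved, stated in full; the proofs are below) =====
def Claim_equal_provide_feedback : Prop := ∀ (scores : List (String × Int)), Dom_provide_feedback scores → Spec_provide_feedback scores (provide_feedback scores)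

-- ===== LEMMAS AND PROOFS =====

def pvLineA (ms : String × Int) : String :=
  if ms.2 > 8 then "Excellent " ++ ms.1 ++ " skills."
  else if ms.2 > 6 then "Good " ++ ms.1 ++ " skills."
  else if ms.2 > 4 then "Average " ++ ms.1 ++ " skills."
  else "Needs improvement in " ++ ms.1 ++ "."

def pvLineB (ms : String × Int) : String :=
  let band := min (max (PySem.Int.floordiv (ms.2 - 3) 2) 0) 3
  let tpl := pvLabels.getD band.toNat ("", "")
  tpl.1 ++ ms.1 ++ tpl.2

-- the tail of the joined string: "\n" ++ line, for each remaining item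
def pvTailStr : List (String × Int) → String
  | [] => ""
  | m :: t => "\n" ++ pvLineA m ++ pvTailStr t

theorem pvLine_eq (ms : String × Int) : pvLineB ms = pvLineA ms := by
  obtain ⟨m, s⟩ := ms
  have hf : PySem.Int.floordiv (s - 3) 2 = (s - 3) / 2 :=
    PySem.Int.floordiv_eq_ediv_of_pos (by omega)
  unfold pvLineB pvLineA pvLabels
  simp only [hf]
  by_cases h8 : s > 8
  · have hb : min (max ((s - 3) / 2) 0) 3 = 3 := by omega
    simp [hb, h8]
  · by_cases h6 : s > 6
    · have hb : min (max ((s - 3) / 2) 0) 3 = 2 := by omega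
      simp [hb, h8, h6]
    · by_cases h4 : s > 4
      · have hb : min (max ((s - 3) / 2) 0) 3 = 1 := by omega
        simp [hb, h8, h6, h4]
      · have hb : min (max ((s - 3) / 2) 0) 3 = 0 := by omega
        simp [hb, h8, h6, h4]

theorem pvFoldA (scores : List (String × Int)) (acc : List String) :
    scores.foldl (fun fb ms =>
      if ms.2 > 8 then fb ++ ["Excellent " ++ ms.1 ++ " skills."]
      else if ms.2 > 6 then fb ++ ["Good " ++ ms.1 ++ " skills."]
      else if ms.2 > 4 then fb ++ ["Average " ++ ms.1 ++ " skills."]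
      else fb ++ ["Needs improvement in " ++ ms.1 ++ "."]) acc
      = acc ++ scores.map pvLineA := by
  induction scores generalizing acc with
  | nil => simp
  | cons hd tl ih =>
    simp only [List.foldl_cons, List.map_cons]
    rw [ih]
    unfold pvLineA
    split_ifs <;> simp

-- Str-level cons-cons step of join (via the Chars bridge)
theorem pvJoin_cc (a b : String) (l : List String) :
    PySem.Str.join "\n" (a :: b :: l) = a ++ "\n" ++ PySem.Str.join "\n" (b :: l) := by
  have hc : ∀ (cs : List Char), String.ofList ('\n' :: cs) = "\n" ++ String.ofList cs := by
    intro cs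
    rw [show ('\n' :: cs) = ['\n'] ++ cs from rfl, String.ofList_append]
  simp only [PySem.Str.join, List.map_cons]
  rw [show ("\n" : String).toList = ['\n'] from rfl, PySem.Chars.join_cons_cons]
  simp [String.ofList_append, hc, String.append_assoc]

-- A's join of the mapped lines, in head/tail form
theorem pvJoinA (l : List (String × Int)) :
    PySem.Str.join "\n" (l.map pvLineA)
      = match l with
        | [] => ""
        | m :: t => pvLineA m ++ pvTailStr t := by
  induction l with
  | nil => simp [PySem.Str.join]
  | cons m t ih =>
    cases t with
    | nil => simp [PySem.Str.join, pvTailStr]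
    | cons h2 t2 =>
      simp only [List.map_cons] at ih ⊢
      rw [pvJoin_cc, ih,
        show pvTailStr (h2 :: t2) = "\n" ++ pvLineA h2 ++ pvTailStr t2 from rfl]
      simp [String.append_assoc]

-- B's fold after the first item: state (acc, "\n") accumulates acc ++ pvTailStr
theorem pvStepB_eq (st : String × String) (ms : String × Int) :
    pvStepB st ms = (st.1 ++ st.2 ++ pvLineB ms, "\n") := rfl

theorem pvFoldB (l : List (String × Int)) (acc : String) :
    (l.foldl pvStepB (acc, "\n")).1 = acc ++ pvTailStr l := by
  induction l generalizing acc with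
  | nil => simp [pvTailStr]
  | cons m t ih =>
    rw [List.foldl_cons, pvStepB_eq, ih,
      show pvTailStr (m :: t) = "\n" ++ pvLineA m ++ pvTailStr t from rfl, pvLine_eq]
    simp [String.append_assoc]

-- ===== VERDICT (by name: the statement is the Claim_ definition above) =====
theorem provide_feedback_spec : Claim_equal_provide_feedback := by
  intro scores _
  unfold Spec_provide_feedback provide_feedback provide_feedback_alt
  rw [pvFoldA]
  simp only [List.nil_append]
  rw [pvJoinA]
  cases scores with
  | nil => simp
  | cons m t =>
    have h0 : pvStepB ("", "") m = (pvLineB m, "\n") := by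
      rw [pvStepB_eq]; simp
    rw [List.foldl_cons, h0, pvFoldB, pvLine_eq]
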